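-- pv_equiv track=rewrite | github.com/ChiragNSundar/VibeLyrics | app/analysis/rhyme_detector.py | _get_coda
-- ===== SOURCE A (Python) =====
-- from typing import List, Dict, Tuple, Optional
--
-- def _get_coda(phones: List[str]) -> str:
--     """Get the consonant sounds after the last vowel"""
--     coda = []
--     found_vowel = False
--     for p in reversed(phones):
--         if any(c.isdigit() for c in p):
--             found_vowel = True
--             break
--         coda.insert(0, p)
--     return " ".join(coda) if found_vowel else ""
-- ===== SOURCE B (Python) =====
-- def _get_coda(phones):
--     idx = -1
--     for i, p in enumerate(phones):
--         if any(c.isdigit() for c in p):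
--             idx = i
--     return " ".join(phones[idx + 1:]) if idx >= 0 else ""
-- ===== Notes on version B (the rewrite author's own statement) =====
-- stated objective: faster
-- what changed: Replaces the reversed-iteration loop with break and quadratic insert(0) accumulation by a single forward pass recording the last vowel index followed by one slice-and-join.
import Mathlib
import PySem

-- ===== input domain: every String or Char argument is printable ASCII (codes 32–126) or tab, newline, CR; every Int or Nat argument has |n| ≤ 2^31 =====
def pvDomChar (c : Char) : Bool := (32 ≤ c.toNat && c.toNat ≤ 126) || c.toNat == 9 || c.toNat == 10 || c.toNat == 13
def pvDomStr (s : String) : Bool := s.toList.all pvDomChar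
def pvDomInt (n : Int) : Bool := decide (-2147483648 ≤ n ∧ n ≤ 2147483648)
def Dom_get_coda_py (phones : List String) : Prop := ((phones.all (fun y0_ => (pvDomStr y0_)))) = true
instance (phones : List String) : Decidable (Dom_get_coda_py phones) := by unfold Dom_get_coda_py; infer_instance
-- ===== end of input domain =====

-- B replaces A's reversed loop with break and insert(0) accumulation by a forward
-- last-vowel-index scan followed by one slice-and-join, avoiding the quadratic insert(0) accumulation (objective: faster, measured).

-- ===== PORT A =====
-- any(c.isdigit() for c in p)
def pvHasDigit (p : String) : Bool := p.toList.any PySem.Chars.isdigit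

-- for p in reversed(phones): if any(...): found_vowel = True; break; coda.insert(0, p)
def pvALoop : List String → List String → List String × Bool
  | [], coda => (coda, false)
  | p :: rest, coda =>
      if pvHasDigit p then (coda, true) else pvALoop rest (p :: coda)

def get_coda_py (phones : List String) : String :=
  let r := pvALoop phones.reverse []
  if r.2 then PySem.Str.join " " r.1 else ""

-- ===== PORT B =====
-- idx = -1; for i, p in enumerate(phones): if any(...): idx = i
def pvBLoop : List String → Int → Int → Int
  | [], _, idx => idx
  | p :: rest, i, idx => pvBLoop rest (i + 1) (if pvHasDigit p then i else idx)

def get_coda_py_alt (phones : List String) : String :=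
  let idx := pvBLoop phones 0 (-1)
  if idx ≥ 0 then PySem.Str.join " " (PySem.List.slice phones (some (idx + 1)) none) else ""

-- ===== PRECONDITION & SPEC =====
def Spec_get_coda_py (phones : List String) (out : String) : Prop := out = get_coda_py_alt phones
instance (phones : List String) (out : String) : Decidable (Spec_get_coda_py phones out) := by unfold Spec_get_coda_py; infer_instance

-- ===== CLAIM (what is proved, stated in full; the proofs are below) =====
def Claim_equal_get_coda_py : Prop := ∀ (phones : List String), Dom_get_coda_py phones → Spec_get_coda_py phones (get_coda_py phones)

-- ===== LEMMAS AND PROOFS =====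

theorem pvALoop_spec (l coda : List String) :
    pvALoop l coda =
      if l.any pvHasDigit then
        ((l.takeWhile (fun p => !pvHasDigit p)).reverse ++ coda, true)
      else (l.reverse ++ coda, false) := by
  induction l generalizing coda with
  | nil => simp [pvALoop]
  | cons p rest ih =>
      by_cases h : pvHasDigit p
      · simp [pvALoop, h, List.any_cons]
      · simp only [pvALoop, h, if_neg, Bool.false_eq_true, not_false_eq_true, ih,
          List.any_cons, Bool.false_or, List.takeWhile_cons, Bool.not_false, if_true,
          List.reverse_cons]
        by_cases ha : rest.any pvHasDigit <;> simp [ha]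

theorem pvBLoop_no (l : List String) (i idx : Int)
    (h : l.all (fun p => !pvHasDigit p)) : pvBLoop l i idx = idx := by
  induction l generalizing i idx with
  | nil => rfl
  | cons p rest ih =>
      simp only [List.all_cons, Bool.and_eq_true, Bool.not_eq_eq_eq_not, Bool.not_true] at h
      simp [pvBLoop, h.1, ih _ _ h.2]

theorem pvBLoop_append (a b : List String) (i idx : Int) :
    pvBLoop (a ++ b) i idx = pvBLoop b (i + a.length) (pvBLoop a i idx) := by
  induction a generalizing i idx with
  | nil => simp [pvBLoop]
  | cons p rest ih =>
      simp only [List.cons_append, pvBLoop, ih, List.length_cons]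
      congr 1
      push_cast
      ring

-- ===== VERDICT (by name: the statement is the Claim_ definition above) =====
theorem get_coda_py_spec : Claim_equal_get_coda_py := by
  intro phones _
  unfold Spec_get_coda_py
  by_cases hany : phones.any pvHasDigit
  · -- there is a vowel phone
    have hrev : phones.reverse.any pvHasDigit := by simpa using hany
    set t := phones.reverse.takeWhile (fun p => !pvHasDigit p) with ht
    set u := phones.reverse.dropWhile (fun p => !pvHasDigit p) with hu
    have htu : t ++ u = phones.reverse := List.takeWhile_append_dropWhile
    obtain ⟨q, u', hq⟩ : ∃ q u', u = q :: u' := by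
      rcases hcases : u with _ | ⟨q, u'⟩
      · exfalso
        have hrt : phones.reverse = t := by rw [← htu, hcases, List.append_nil]
        have hta : phones.reverse.all (fun p => !pvHasDigit p) := by
          rw [hrt, ht]; exact List.all_takeWhile
        obtain ⟨x, hx, hdx⟩ := List.any_eq_true.mp hrev
        have := List.all_eq_true.mp hta x hx
        simp [hdx] at this
      · exact ⟨q, u', rfl⟩
    have hdq : pvHasDigit q := by
      have h2 := List.head_dropWhile_not (p := fun p => !pvHasDigit p)
        (l := phones.reverse) (by rw [← hu, hq]; simp)
      simpa [← hu, hq] using h2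
    have hphones : phones = u.reverse ++ t.reverse := by
      have := congrArg List.reverse htu
      simpa [List.reverse_append] using this.symm
    have ht_all : t.reverse.all (fun p => !pvHasDigit p) := by
      rw [List.all_reverse, ht]; exact List.all_takeWhile
    have hb : pvBLoop phones 0 (-1) = (u'.length : Int) := by
      rw [hphones, pvBLoop_append, pvBLoop_no _ _ _ ht_all, hq]
      rw [List.reverse_cons, pvBLoop_append]
      simp [pvBLoop, hdq]
    have hdrop : phones.drop u.length = t.reverse := by
      rw [hphones]
      have hlu : u.length = u.reverse.length := by simp
      rw [hlu, List.drop_left]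
    have hslice : PySem.List.slice phones (some ((u'.length : Int) + 1)) none = t.reverse := by
      have hlen : ((u'.length : Int) + 1) = ((u.length : Nat) : Int) := by
        rw [hq, List.length_cons]; push_cast; ring
      rw [hlen, PySem.List.slice_from_natCast, hdrop]
    simp only [get_coda_py, get_coda_py_alt, pvALoop_spec, hrev, if_true, hb, hslice,
      List.append_nil, ge_iff_le, Int.natCast_nonneg]
    rw [← ht]
  · -- no vowel phone anywhere
    have hanyf : phones.any pvHasDigit = false := Bool.eq_false_iff.mpr hany
    have hrev : phones.reverse.any pvHasDigit = false := by
      simp only [List.any_reverse]; exact hanyf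
    have hall : phones.all (fun p => !pvHasDigit p) := by
      rw [List.all_eq_not_any_not]
      simp [hanyf]
    simp only [get_coda_py, get_coda_py_alt, pvALoop_spec, hrev, pvBLoop_no _ _ _ hall]
    simp
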